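-- pv_equiv track=rewrite | github.com/PIERRE-PELLEROT/glowing-lamp | methode.py | point_in
-- ===== SOURCE A (Python) =====
-- def point_in( coordonnees, objet, taille_objet=[64,64]):
--     """Vérifie si les coordonnees rentrées appartiennent à l'objet"""
--
--     if type(objet)==list or type(objet)==tuple:
--         for i in range(int(objet[0]),int(objet[0])+int(taille_objet[0])):
--             for j in range(int(objet[1]),int(objet[1])+int(taille_objet[1])):
--
--                 if i==coordonnees[0] and j==coordonnees[1]:
--                     return True
--
--     elif type(objet)!=int:
--
--
--
--         objet_c=[objet.c_collision[0], objet.c_collision[1]]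
--         try:
--            taille_objet=[objet.t_collision[0],objet.t_collision[1]]
--         except:
--
--             pass
--         for i in range(objet_c[0],objet_c[0]+taille_objet[0]):
--             for j in range(objet_c[1],objet_c[1]+taille_objet[1]):
--
--                 if i==coordonnees[0] and j==coordonnees[1]:
--                     return True
--
--     return False
-- ===== SOURCE B (Python) =====
-- def point_in(coordonnees, objet, taille_objet=[64, 64]):
--     """Vérifie si les coordonnees rentrées appartiennent à l'objet"""
--     x, y = coordonnees[0], coordonnees[1]
--     return (objet[0] <= x < objet[0] + taille_objet[0]
--             and objet[1] <= y < objet[1] + taille_objet[1])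
-- ===== Notes on version B (the rewrite author's own statement) =====
-- stated objective: simpler
-- what changed: Replaces the nested scan over the cells of the rectangle with a direct interval bounds check on x and y.
-- outside the precondition, e.g. on point_in([5], [0, 0], [2, 2]): A returns False, B raises IndexError
import Mathlib
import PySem

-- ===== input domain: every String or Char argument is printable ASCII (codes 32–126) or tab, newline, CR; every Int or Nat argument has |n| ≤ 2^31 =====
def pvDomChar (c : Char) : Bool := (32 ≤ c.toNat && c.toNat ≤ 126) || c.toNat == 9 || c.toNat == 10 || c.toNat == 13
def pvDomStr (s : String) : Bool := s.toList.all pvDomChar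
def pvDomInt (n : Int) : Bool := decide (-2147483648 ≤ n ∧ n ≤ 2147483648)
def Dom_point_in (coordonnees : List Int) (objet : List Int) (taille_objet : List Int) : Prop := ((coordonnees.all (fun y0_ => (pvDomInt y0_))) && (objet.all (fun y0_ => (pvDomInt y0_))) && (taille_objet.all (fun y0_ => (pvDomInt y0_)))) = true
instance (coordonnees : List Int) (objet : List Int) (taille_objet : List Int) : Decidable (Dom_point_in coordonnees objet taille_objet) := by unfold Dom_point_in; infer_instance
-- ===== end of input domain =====

-- B replaces A's cell-by-cell scan of the rectangle by a direct interval bounds check on x and y (simpler).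


-- ===== PORT A =====
-- Literal port of A: objet is a list, so only the first branch runs; the nested
-- for-loops with early 'return True' become nested List.any over the same ranges.
def point_in (coordonnees : List Int) (objet : List Int) (taille_objet : List Int) : Bool :=
  let o0 := PySem.List.pyGetD objet 0 0
  let o1 := PySem.List.pyGetD objet 1 0
  let t0 := PySem.List.pyGetD taille_objet 0 0
  let t1 := PySem.List.pyGetD taille_objet 1 0
  let c0 := PySem.List.pyGetD coordonnees 0 0
  let c1 := PySem.List.pyGetD coordonnees 1 0
  (PySem.List.pyRange o0 (o0 + t0) 1).any (fun i =>
    (PySem.List.pyRange o1 (o1 + t1) 1).any (fun j =>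
      i == c0 && j == c1))

-- ===== PORT B =====
-- Port of B: direct interval bounds check.
def point_in_alt (coordonnees : List Int) (objet : List Int) (taille_objet : List Int) : Bool :=
  let x := PySem.List.pyGetD coordonnees 0 0
  let y := PySem.List.pyGetD coordonnees 1 0
  decide (PySem.List.pyGetD objet 0 0 ≤ x) && decide (x < PySem.List.pyGetD objet 0 0 + PySem.List.pyGetD taille_objet 0 0) &&
  (decide (PySem.List.pyGetD objet 1 0 ≤ y) && decide (y < PySem.List.pyGetD objet 1 0 + PySem.List.pyGetD taille_objet 1 0))

-- ===== PRECONDITION & SPEC =====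
-- Pre_ excludes lists with fewer than two entries: there A raises IndexError, except that
-- with a short coordonnees A can still return False without ever reading the missing entry
-- (empty range or short-circuited 'and'), where B's natural bounds check raises.
def Pre_point_in (coordonnees : List Int) (objet : List Int) (taille_objet : List Int) : Prop :=
  2 ≤ coordonnees.length ∧ 2 ≤ objet.length ∧ 2 ≤ taille_objet.length
instance (coordonnees : List Int) (objet : List Int) (taille_objet : List Int) : Decidable (Pre_point_in coordonnees objet taille_objet) := by unfold Pre_point_in; infer_instance
def pvWitness_point_in : List Int × List Int × List Int := ([1, 1], [0, 0], [2, 2])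
def Spec_point_in (coordonnees : List Int) (objet : List Int) (taille_objet : List Int) (out : Bool) : Prop := out = point_in_alt coordonnees objet taille_objet
instance (coordonnees : List Int) (objet : List Int) (taille_objet : List Int) (out : Bool) : Decidable (Spec_point_in coordonnees objet taille_objet out) := by unfold Spec_point_in; infer_instance

-- ===== CLAIM (what is proved, stated in full; the proofs are below) =====
def Claim_equal_point_in : Prop := ∀ (coordonnees : List Int) (objet : List Int) (taille_objet : List Int), Dom_point_in coordonnees objet taille_objet → Pre_point_in coordonnees objet taille_objet → Spec_point_in coordonnees objet taille_objet (point_in coordonnees objet taille_objet)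

-- ===== LEMMAS AND PROOFS =====

-- ===== VERDICT (by name: the statement is the Claim_ definition above) =====
theorem point_in_spec : Claim_equal_point_in := by
  intro c o t _ _
  unfold Spec_point_in point_in point_in_alt
  rw [Bool.eq_iff_iff]
  simp only [List.any_eq_true, PySem.List.mem_pyRange_one, beq_iff_eq, Bool.and_eq_true,
    decide_eq_true_eq]
  constructor
  · rintro ⟨i, ⟨hi1, hi2⟩, j, ⟨hj1, hj2⟩, rfl, rfl⟩
    omega
  · rintro ⟨⟨h1, h2⟩, h3, h4⟩
    exact ⟨_, ⟨h1, h2⟩, _, ⟨h3, h4⟩, rfl, rfl⟩
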